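-- pv_equiv track=rewrite | github.com/siriscmv/aoc25 | solutions/d02.py | is_invalid
-- ===== SOURCE A (Python) =====
-- def is_invalid(num, p):
--     num_str = str(num)
--     length = len(num_str)
--     mid = length // 2
--
--     if p == 1:
--         return length % 2 == 0 and num_str[:mid] == num_str[mid:]
--
--     for i in range(1, mid + 1):
--         seq = num_str[:i]
--         if seq * (length // i) == num_str:
--             return True
--     return False
-- ===== SOURCE B (Python) =====
-- def is_invalid(num, p):
--     s = str(num)
--     n = len(s)
--     if p == 1:
--         return n % 2 == 0 and s[:n // 2] == s[n // 2:]
--     return s in (s + s)[1:-1]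
-- ===== Notes on version B (the rewrite author's own statement) =====
-- stated objective: idiomatic
-- what changed: The candidate-prefix loop with repeated string-multiplication is replaced by the classic doubled-string periodicity idiom: s in (s+s)[1:-1].
import Mathlib
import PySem

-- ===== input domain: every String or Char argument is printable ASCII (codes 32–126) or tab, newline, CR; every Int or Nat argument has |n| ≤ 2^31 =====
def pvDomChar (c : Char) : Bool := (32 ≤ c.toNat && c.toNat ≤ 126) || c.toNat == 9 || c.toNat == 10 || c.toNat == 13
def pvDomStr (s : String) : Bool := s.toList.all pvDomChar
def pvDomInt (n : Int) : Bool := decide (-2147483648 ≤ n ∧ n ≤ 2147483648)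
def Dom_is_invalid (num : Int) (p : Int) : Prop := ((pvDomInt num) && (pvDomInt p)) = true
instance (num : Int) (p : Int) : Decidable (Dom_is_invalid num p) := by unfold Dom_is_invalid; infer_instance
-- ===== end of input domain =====

-- B replaces A's candidate-prefix loop (repeated string-multiply comparisons) by the classic
-- doubled-string periodicity idiom 's in (s+s)[1:-1]'; the p == 1 branch is unchanged.

-- ===== PORT A =====
def is_invalid (num : Int) (p : Int) : Bool :=
  let num_str := PySem.Int.toChars num
  let length : Int := num_str.length
  let mid : Int := PySem.Int.floordiv length 2
  if p == 1 then
    (PySem.Int.mod length 2 == 0) &&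
      (PySem.List.slice num_str none (some mid) == PySem.List.slice num_str (some mid) none)
  else
    (PySem.List.pyRange 1 (mid + 1) 1).any (fun i =>
      let seq := PySem.List.slice num_str none (some i)
      PySem.List.pyRepeat seq (PySem.Int.floordiv length i) == num_str)

-- ===== PORT B =====
def is_invalid_alt (num : Int) (p : Int) : Bool :=
  let s := PySem.Int.toChars num
  let n : Int := s.length
  if p == 1 then
    (PySem.Int.mod n 2 == 0) &&
      (PySem.List.slice s none (some (PySem.Int.floordiv n 2)) ==
        PySem.List.slice s (some (PySem.Int.floordiv n 2)) none)
  else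
    PySem.Chars.isIn s (PySem.List.slice (s ++ s) (some 1) (some (-1)))

-- ===== PRECONDITION & SPEC =====
def Spec_is_invalid (num : Int) (p : Int) (out : Bool) : Prop := out = is_invalid_alt num p
instance (num : Int) (p : Int) (out : Bool) : Decidable (Spec_is_invalid num p out) := by unfold Spec_is_invalid; infer_instance

-- ===== CLAIM (what is proved, stated in full; the proofs are below) =====
def Claim_equal_is_invalid : Prop := ∀ (num : Int) (p : Int), Dom_is_invalid num p → Spec_is_invalid num p (is_invalid num p)

-- ===== LEMMAS AND PROOFS =====

-- str(n) is never the empty string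
theorem pv_toDigitsCore_ne_nil (b : ℕ) : ∀ (fuel n : ℕ) (lst : List Char),
    (0 < fuel ∨ lst ≠ []) → Nat.toDigitsCore b fuel n lst ≠ [] := by
  intro fuel
  induction fuel with
  | zero =>
    intro n lst h
    rcases h with h | h
    · omega
    · simpa [Nat.toDigitsCore] using h
  | succ f ih =>
    intro n lst _
    simp only [Nat.toDigitsCore]
    split
    · exact List.cons_ne_nil _ _
    · exact ih _ _ (Or.inr (List.cons_ne_nil _ _))

theorem pv_toChars_ne_nil (n : Int) : PySem.Int.toChars n ≠ [] := by
  unfold PySem.Int.toChars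
  split
  · exact List.cons_ne_nil _ _
  · exact pv_toDigitsCore_ne_nil 10 _ _ [] (Or.inl (Nat.succ_pos _))

theorem pv_take_head (t r : List Char) (g : ℕ) (hlt : t.length = g) :
    (t ++ r).take g = t := by
  subst hlt; simp

theorem pv_drop_head (t r : List Char) (g : ℕ) (hlt : t.length = g) :
    (t ++ r).drop g = r := by
  subst hlt; simp

-- take s.length of (s++s) dropped by k is the k-rotation of s
theorem pv_rotpiece (s : List Char) (k : ℕ) (hk : k ≤ s.length) :
    List.take s.length (List.drop k (s ++ s)) = s.drop k ++ s.take k := by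
  have h0 : k - s.length = 0 := by omega
  rw [List.drop_append, h0, List.drop_zero, List.take_append,
    List.take_of_length_le (by simp)]
  congr 1
  congr 1
  simp
  omega

-- rotation by a multiple of a fixed point of rotate
theorem pv_rot_mul (l : List Char) (k : ℕ) (h : l.rotate k = l) :
    ∀ a : ℕ, l.rotate (a * k) = l := by
  intro a
  induction a with
  | zero => simp
  | succ a ih => rw [Nat.succ_mul, ← List.rotate_rotate, ih, h]

-- Bezout over ℕ in the form we need
theorem pv_bezout_nat (k L : ℕ) (hk : 1 ≤ k) (hkL : k < L) :
    ∃ a b : ℕ, a * k = Nat.gcd k L + b * L := by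
  have hL : 0 < L := by omega
  have hbez : (Nat.gcd k L : ℤ) = k * Nat.gcdA k L + L * Nat.gcdB k L := Nat.gcd_eq_gcd_ab k L
  set x : ℤ := Nat.gcdA k L with hx
  set a' : ℤ := x % L with ha'
  have hL' : (0:ℤ) < L := by exact_mod_cast hL
  have h0 : (0:ℤ) ≤ a' := Int.emod_nonneg x (by omega)
  set c : ℤ := -(Nat.gcdB k L) - k * (x / L) with hc
  have key : (k:ℤ) * a' = (Nat.gcd k L : ℤ) + c * L := by
    have hae : a' = x - L * (x / L) := by rw [ha', Int.emod_def]
    rw [hae, hc]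
    linear_combination -hbez
  have hg1 : 1 ≤ (Nat.gcd k L : ℤ) := by
    have := Nat.gcd_pos_of_pos_left (n := L) (m := k) (by omega)
    exact_mod_cast this
  have hgk : (Nat.gcd k L : ℤ) ≤ k := by
    have := Nat.gcd_le_left (n := L) (m := k) (by omega)
    exact_mod_cast this
  have ha1 : 1 ≤ a' := by
    by_contra h
    have ha0 : a' = 0 := by omega
    rw [ha0, mul_zero] at key
    have hgL : (Nat.gcd k L : ℤ) < L := by
      have : (k:ℤ) < L := by exact_mod_cast hkL
      omega
    have hprod : c * L ≤ -1 := by linarith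
    have hcneg : c ≤ -1 := by nlinarith
    have h2 : c * L ≤ -1 * L := mul_le_mul_of_nonneg_right hcneg (by linarith)
    linarith
  have hka : (k:ℤ) * 1 ≤ k * a' := mul_le_mul_of_nonneg_left ha1 (by positivity)
  have hclL : 0 ≤ c * L := by linarith [key]
  have hc0 : 0 ≤ c := by
    by_contra h
    have hneg : c < 0 := by omega
    have := mul_neg_of_neg_of_pos hneg hL'
    linarith
  refine ⟨a'.toNat, c.toNat, ?_⟩
  have h1 : ((a'.toNat : ℤ)) = a' := Int.toNat_of_nonneg (by linarith)
  have h2 : ((c.toNat : ℤ)) = c := Int.toNat_of_nonneg hc0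
  have : ((a'.toNat * k : ℕ) : ℤ) = ((Nat.gcd k L + c.toNat * L : ℕ) : ℤ) := by
    push_cast
    rw [h1, h2]
    linarith [key]
  exact_mod_cast this

-- from a rotation fixed point obtain a rotation fixed point at the gcd
theorem pv_rot_gcd (l : List Char) (k : ℕ) (hk : 1 ≤ k) (hkL : k < l.length)
    (h : l.rotate k = l) : l.rotate (Nat.gcd k l.length) = l := by
  obtain ⟨a, b, hab⟩ := pv_bezout_nat k l.length hk hkL
  have h1 : l.rotate (a * k) = l := pv_rot_mul l k h a
  have hg : Nat.gcd k l.length % l.length = (a * k) % l.length := by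
    rw [hab]
    have hlt : Nat.gcd k l.length < l.length :=
      lt_of_le_of_lt (Nat.gcd_le_left _ (by omega)) hkL
    rw [Nat.add_mul_mod_self_right, Nat.mod_eq_of_lt hlt]
  calc l.rotate (Nat.gcd k l.length)
      = l.rotate (Nat.gcd k l.length % l.length) := (List.rotate_mod _ _).symm
    _ = l.rotate ((a * k) % l.length) := by rw [hg]
    _ = l.rotate (a * k) := List.rotate_mod _ _
    _ = l := h1

-- a rotation fixed point at a divisor of the length makes the list a power of its prefix
theorem pv_pow_of_rot : ∀ (m g : ℕ) (l : List Char), 1 ≤ g → l.length = m * g →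
    l.drop g ++ l.take g = l → (List.replicate m (l.take g)).flatten = l := by
  intro m
  induction m with
  | zero =>
    intro g l _ hlen _
    simp only [Nat.zero_mul] at hlen
    have : l = [] := List.length_eq_zero_iff.mp hlen
    simp [this]
  | succ m ih =>
    intro g l hg hlen hrot
    rcases Nat.eq_zero_or_pos m with hm | hm
    · subst hm
      simp only [Nat.zero_add, one_mul] at hlen
      simp [List.take_of_length_le (le_of_eq hlen)]
    · have hgl : g ≤ l.length := by nlinarith
      have hlt : (l.take g).length = g := by
        rw [List.length_take]; omega
      set t := l.take g with ht
      set r := l.drop g with hrdef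
      have hts : t ++ r = l := List.take_append_drop g l
      have hcomm : r ++ t = t ++ r := by rw [hts]; exact hrot
      have hlr : r.length = m * g := by
        rw [hrdef, List.length_drop, hlen, Nat.succ_mul]; omega
      have hgr : g ≤ r.length := by rw [hlr]; nlinarith
      have htake : r.take g = t := by
        have h := congrArg (List.take g) hcomm
        rw [pv_take_head t r g hlt] at h
        rw [List.take_append, Nat.sub_eq_zero_of_le hgr, List.take_zero, List.append_nil] at h
        exact h
      have hdropc : r.drop g ++ t = r := by
        have h := congrArg (List.drop g) hcomm
        rw [pv_drop_head t r g hlt] at h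
        rw [List.drop_append, Nat.sub_eq_zero_of_le hgr, List.drop_zero] at h
        exact h
      have hrrot : r.drop g ++ r.take g = r := by rw [htake]; exact hdropc
      have hihr := ih g r hg hlr hrrot
      rw [htake] at hihr
      calc (List.replicate (m + 1) t).flatten
          = t ++ (List.replicate m t).flatten := by rw [List.replicate_succ, List.flatten_cons]
        _ = t ++ r := by rw [hihr]
        _ = l := hts

-- the heart: non-trivial power of a prefix ⟺ non-trivial rotation fixed point
theorem pv_core (s : List Char) (hs : s ≠ []) :
    (∃ i : ℕ, 1 ≤ i ∧ i ≤ s.length / 2 ∧ (List.replicate (s.length / i) (s.take i)).flatten = s)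
    ↔ (∃ k : ℕ, 1 ≤ k ∧ k + 1 ≤ s.length ∧ s.drop k ++ s.take k = s) := by
  have hL : 0 < s.length := List.length_pos_iff.mpr hs
  constructor
  · rintro ⟨i, hi1, hi2, hrep⟩
    have hiL : i ≤ s.length := le_trans hi2 (Nat.div_le_self _ _)
    have hti : (s.take i).length = i := by rw [List.length_take]; omega
    have hflen : ((List.replicate (s.length / i) (s.take i)).flatten).length
        = (s.length / i) * i := by
      simp [List.length_flatten, List.map_replicate, List.sum_replicate, smul_eq_mul, hti]
    have hlen2 := congrArg List.length hrep
    rw [hflen] at hlen2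
    have hdvd : i ∣ s.length := Dvd.intro_left _ hlen2
    have h2i : 2 * i ≤ s.length := by omega
    have hm2 : 2 ≤ s.length / i := (Nat.le_div_iff_mul_le (by omega)).mpr (by omega)
    refine ⟨i, hi1, by omega, ?_⟩
    obtain ⟨m', hm'⟩ : ∃ m', s.length / i = m' + 1 := ⟨s.length / i - 1, by omega⟩
    have hsplit : s = s.take i ++ (List.replicate m' (s.take i)).flatten := by
      conv_lhs => rw [← hrep]
      rw [hm', List.replicate_succ, List.flatten_cons]
    have hd : s.drop i = (List.replicate m' (s.take i)).flatten := by
      conv_lhs => rw [hsplit]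
      exact pv_drop_head _ _ _ hti
    have hcomm : (List.replicate m' (s.take i)).flatten ++ s.take i
        = s.take i ++ (List.replicate m' (s.take i)).flatten := by
      calc (List.replicate m' (s.take i)).flatten ++ s.take i
          = (List.replicate m' (s.take i) ++ [s.take i]).flatten := by
            rw [List.flatten_append]; simp
        _ = (List.replicate (m' + 1) (s.take i)).flatten := by rw [← List.replicate_succ']
        _ = s.take i ++ (List.replicate m' (s.take i)).flatten := by
            rw [List.replicate_succ, List.flatten_cons]
    rw [hd, hcomm, ← hsplit]
  · rintro ⟨k, hk1, hk2, hrot⟩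
    have hkL : k < s.length := by omega
    have hrotk : s.rotate k = s := by
      rw [List.rotate_eq_drop_append_take (by omega)]; exact hrot
    have hgrot : s.rotate (Nat.gcd k s.length) = s := pv_rot_gcd s k hk1 hkL hrotk
    have hgdvd : Nat.gcd k s.length ∣ s.length := Nat.gcd_dvd_right _ _
    have hg1 : 1 ≤ Nat.gcd k s.length := Nat.gcd_pos_of_pos_left _ (by omega)
    have hgk : Nat.gcd k s.length ≤ k := Nat.gcd_le_left _ (by omega)
    have hgL : Nat.gcd k s.length < s.length := by omega
    have h2g : 2 * Nat.gcd k s.length ≤ s.length := by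
      rcases hgdvd with ⟨q, hq⟩
      have hq0 : 0 < q := by
        rcases Nat.eq_zero_or_pos q with h | h
        · rw [h, Nat.mul_zero] at hq; omega
        · exact h
      have hqne1 : q ≠ 1 := by
        intro h; rw [h, Nat.mul_one] at hq; omega
      have hq2 : 2 ≤ q := by omega
      have hmul : Nat.gcd k s.length * 2 ≤ Nat.gcd k s.length * q :=
        Nat.mul_le_mul_left _ hq2
      omega
    refine ⟨Nat.gcd k s.length, hg1, by omega, ?_⟩
    have hrotg : s.drop (Nat.gcd k s.length) ++ s.take (Nat.gcd k s.length) = s := by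
      rw [← List.rotate_eq_drop_append_take (by omega)]; exact hgrot
    exact pv_pow_of_rot (s.length / Nat.gcd k s.length) (Nat.gcd k s.length) s hg1
      (by rw [Nat.div_mul_cancel hgdvd]) hrotg

-- A's loop, characterised
theorem pv_A_iff (s : List Char) :
    ((PySem.List.pyRange 1 (PySem.Int.floordiv (s.length : ℤ) 2 + 1) 1).any (fun i =>
        PySem.List.pyRepeat (PySem.List.slice s none (some i)) (PySem.Int.floordiv (s.length : ℤ) i) == s)) = true
    ↔ (∃ i : ℕ, 1 ≤ i ∧ i ≤ s.length / 2 ∧ (List.replicate (s.length / i) (s.take i)).flatten = s) := by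
  have hfd : PySem.Int.floordiv (s.length : ℤ) 2 = (s.length : ℤ) / 2 :=
    PySem.Int.floordiv_eq_ediv_of_pos (by norm_num)
  rw [List.any_eq_true]
  constructor
  · rintro ⟨x, hmem, hx⟩
    rw [PySem.List.mem_pyRange_one, hfd] at hmem
    obtain ⟨h1x, h2x⟩ := hmem
    have hxi : x = ((x.toNat : ℕ) : ℤ) := by omega
    refine ⟨x.toNat, by omega, by omega, ?_⟩
    rw [hxi] at hx
    rw [PySem.List.slice_to _ (Int.natCast_nonneg _), PySem.Int.floordiv_natCast] at hx
    simp only [PySem.List.pyRepeat, beq_iff_eq, Int.toNat_natCast] at hx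
    exact hx
  · rintro ⟨i, hi1, hi2, hrep⟩
    refine ⟨(i : ℤ), ?_, ?_⟩
    · rw [PySem.List.mem_pyRange_one, hfd]
      omega
    · rw [PySem.List.slice_to _ (Int.natCast_nonneg _), PySem.Int.floordiv_natCast]
      simp only [PySem.List.pyRepeat, beq_iff_eq, Int.toNat_natCast]
      exact hrep

-- B's containment test, characterised
theorem pv_B_iff (s : List Char) (hs : s ≠ []) :
    PySem.Chars.isIn s (PySem.List.slice (s ++ s) (some 1) (some (-1))) = true
    ↔ (∃ k : ℕ, 1 ≤ k ∧ k + 1 ≤ s.length ∧ s.drop k ++ s.take k = s) := by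
  have hL : 0 < s.length := List.length_pos_iff.mpr hs
  have hca : PySem.List.clampIdx (s ++ s).length 1 = 1 := by
    simp only [PySem.List.clampIdx]
    rw [if_neg (by norm_num), Int.toNat_one, List.length_append]
    omega
  have hcb : PySem.List.clampIdx (s ++ s).length (-1) = 2 * s.length - 1 := by
    simp only [PySem.List.clampIdx]
    rw [if_pos (by norm_num), if_neg (by rw [List.length_append]; push_cast; omega),
      List.length_append]
    omega
  have hinner : PySem.List.slice (s ++ s) (some 1) (some (-1))
      = ((s ++ s).drop 1).take (2 * s.length - 2) := by
    simp only [PySem.List.slice, hca, hcb]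
    congr 1
  rw [hinner, ← PySem.Chars.exists_prefix_drop_iff_isIn]
  constructor
  · rintro ⟨j, hpre⟩
    have hlenin : (((s ++ s).drop 1).take (2 * s.length - 2)).length = 2 * s.length - 2 := by
      rw [List.length_take, List.length_drop, List.length_append]; omega
    have hle := hpre.length_le
    rw [List.length_drop, hlenin] at hle
    have hj2 : j + 2 ≤ s.length := by omega
    have heq : (((s ++ s).drop 1).take (2 * s.length - 2)).drop j
        = ((s ++ s).drop (1 + j)).take (2 * s.length - 2 - j) := by
      rw [List.drop_take, List.drop_drop]
    rw [heq] at hpre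
    rw [List.prefix_iff_eq_take] at hpre
    rw [List.take_take] at hpre
    have hmin : min s.length (2 * s.length - 2 - j) = s.length := by omega
    rw [hmin] at hpre
    have hrp := pv_rotpiece s (1 + j) (by omega)
    rw [hrp] at hpre
    exact ⟨1 + j, by omega, by omega, hpre.symm⟩
  · rintro ⟨k, hk1, hk2, hrot⟩
    refine ⟨k - 1, ?_⟩
    have heq : (((s ++ s).drop 1).take (2 * s.length - 2)).drop (k - 1)
        = ((s ++ s).drop k).take (2 * s.length - 2 - (k - 1)) := by
      rw [List.drop_take, List.drop_drop]
      congr 2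
      omega
    rw [heq, List.prefix_iff_eq_take, List.take_take]
    have hmin : min s.length (2 * s.length - 2 - (k - 1)) = s.length := by omega
    rw [hmin]
    have hrp := pv_rotpiece s k (by omega)
    rw [hrp, hrot]

-- ===== VERDICT (by name: the statement is the Claim_ definition above) =====
theorem is_invalid_spec : Claim_equal_is_invalid := by
  intro num p _
  unfold Spec_is_invalid
  simp only [is_invalid, is_invalid_alt]
  by_cases hp : (p == 1) = true
  · rw [if_pos hp, if_pos hp]
  · rw [if_neg hp, if_neg hp]
    have hs : PySem.Int.toChars num ≠ [] := pv_toChars_ne_nil num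
    rw [Bool.eq_iff_iff, pv_A_iff (PySem.Int.toChars num), pv_B_iff (PySem.Int.toChars num) hs]
    exact pv_core (PySem.Int.toChars num) hs
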